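-- pv_equiv track=rewrite | github.com/webmaster-cyber/sendmailzw | api/shared/utils.py | parse_balanced_vars
-- ===== SOURCE A (Python) =====
-- def parse_balanced_vars(s: str) -> str:
--     count = 0
--
--     index = 0
--     while True:
--         first = s[index : index + 2]
--         if first == "":
--             break
--         elif first == "{{":
--             count += 1
--             index += 2
--         elif first == "}}":
--             if count == 0:
--                 break
--             count -= 1
--             index += 2
--         else:
--             index += 1
--
--     return s[:index]
-- ===== SOURCE B (Python) =====
-- def parse_balanced_vars(s: str) -> str:
--     count = 0
--     i = 0
--     while True:
--         o = s.find('{{', i)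
--         c = s.find('}}', i)
--         if o != -1 and (c == -1 or o < c):
--             count += 1
--             i = o + 2
--         elif c != -1:
--             if count == 0:
--                 return s[:c]
--             count -= 1
--             i = c + 2
--         else:
--             return s
-- ===== Notes on version B (the rewrite author's own statement) =====
-- stated objective: faster
-- what changed: A steps an index one character at a time, slicing s[i:i+2] at every position; B jumps directly from brace-pair token to token with str.find('{{', i)/str.find('}}', i), keeping the same balance counter.
import Mathlib
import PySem

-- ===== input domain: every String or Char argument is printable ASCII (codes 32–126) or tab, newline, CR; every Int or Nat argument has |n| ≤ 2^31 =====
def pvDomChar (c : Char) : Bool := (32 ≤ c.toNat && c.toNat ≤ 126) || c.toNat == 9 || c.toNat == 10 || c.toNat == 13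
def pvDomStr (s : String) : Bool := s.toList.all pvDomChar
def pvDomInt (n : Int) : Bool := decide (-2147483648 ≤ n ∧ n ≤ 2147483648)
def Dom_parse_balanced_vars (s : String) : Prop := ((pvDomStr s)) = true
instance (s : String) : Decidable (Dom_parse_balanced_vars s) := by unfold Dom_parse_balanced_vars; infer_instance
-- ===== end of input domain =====

-- B replaces A's one-character-at-a-time index walk (which slices s[i:i+2] at every
-- position) by jumping straight between brace-pair tokens with str.find, keeping the
-- same balance counter — an alternative, find-driven algorithm.

-- ===== PORT A =====
-- A's while-loop over `index`, written as structural recursion on the not-yet-scanned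
-- suffix of the string; the returned Nat is the final value of `index` (the amount
-- consumed from this suffix), `count` carried exactly as in the Python.
def pvAGo : List Char → Nat → Nat
  | [], _ => 0                                   -- first == "": break
  | [_], _ => 1                                  -- one char left: else branch, then break
  | c1 :: c2 :: rest, count =>
    if c1 = '{' ∧ c2 = '{' then 2 + pvAGo rest (count + 1)
    else if c1 = '}' ∧ c2 = '}' then
      if count = 0 then 0 else 2 + pvAGo rest (count - 1)
    else 1 + pvAGo (c2 :: rest) count

def parse_balanced_vars (s : String) : String :=
  PySem.Str.slice s none (some ((pvAGo s.toList 0 : Nat) : Int))   -- s[:index]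

-- ===== PORT B =====
-- B's while-loop: at index i, find the next '{{' and the next '}}'; act on the earlier
-- one. `some j` means `return s[:j]`, `none` means `return s`. fuel is a totality
-- guard only (each step moves i forward); it never runs out when called with
-- length + 1 fuel.
def pvBGo (cs : List Char) : Nat → Nat → Nat → Option Nat
  | 0, _, _ => none
  | fuel + 1, count, i =>
    let o := PySem.Chars.findFrom cs ['{', '{'] (i : Int)    -- s.find('{{', i)
    let c := PySem.Chars.findFrom cs ['}', '}'] (i : Int)    -- s.find('}}', i)
    if o ≠ -1 ∧ (c = -1 ∨ o < c) then pvBGo cs fuel (count + 1) (o.toNat + 2)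
    else if c ≠ -1 then
      if count = 0 then some c.toNat
      else pvBGo cs fuel (count - 1) (c.toNat + 2)
    else none

def parse_balanced_vars_alt (s : String) : String :=
  match pvBGo s.toList (s.toList.length + 1) 0 0 with
  | some j => PySem.Str.slice s none (some ((j : Nat) : Int))     -- s[:c]
  | none => s

-- ===== PRECONDITION & SPEC =====
def Spec_parse_balanced_vars (s : String) (out : String) : Prop := out = parse_balanced_vars_alt s
instance (s : String) (out : String) : Decidable (Spec_parse_balanced_vars s out) := by unfold Spec_parse_balanced_vars; infer_instance

-- ===== CLAIM (what is proved, stated in full; the proofs are below) =====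
def Claim_equal_parse_balanced_vars : Prop := ∀ (s : String), Dom_parse_balanced_vars s → Spec_parse_balanced_vars s (parse_balanced_vars s)

-- ===== LEMMAS AND PROOFS =====

-- a prefix occurrence at j ≥ i is an infix occurrence inside the suffix from i
lemma pv_prefix_drop_infix {tok cs : List Char} {i j : Nat} (hij : i ≤ j)
    (h : tok <+: cs.drop j) : tok <:+: cs.drop i := by
  obtain ⟨t, ht⟩ := h
  refine ⟨(cs.drop i).take (j - i), t, ?_⟩
  have hd : cs.drop j = (cs.drop i).drop (j - i) := by
    rw [List.drop_drop]; congr 1; omega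
  rw [hd] at ht
  rw [List.append_assoc, ht, List.take_append_drop]

lemma pv_match_len {tok cs : List Char} {j : Nat} (h : tok <+: cs.drop j) :
    tok.length ≤ cs.length - j := by
  have := h.length_le
  simpa [List.length_drop] using this

-- the three step lemmas for A's scan, phrased on positions
lemma pvAGo_skip {cs : List Char} {j count : Nat} (hj : j < cs.length)
    (ho : ¬ ['{','{'] <+: cs.drop j) (hc : ¬ ['}','}'] <+: cs.drop j) :
    pvAGo (cs.drop j) count = 1 + pvAGo (cs.drop (j + 1)) count := by
  have hd : cs.drop j = cs[j] :: cs.drop (j + 1) := List.drop_eq_getElem_cons hj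
  rw [hd]
  rcases h1 : cs.drop (j+1) with _ | ⟨c2, rest⟩
  · simp [pvAGo]
  · rw [hd, h1] at ho hc
    simp [List.cons_prefix_cons] at ho hc
    simp only [pvAGo]
    rw [if_neg, if_neg]
    · tauto
    · tauto

lemma pvAGo_open {cs : List Char} {j count : Nat} (h : ['{','{'] <+: cs.drop j) :
    pvAGo (cs.drop j) count = 2 + pvAGo (cs.drop (j + 2)) (count + 1) := by
  obtain ⟨t, ht⟩ := h
  have hd2 : cs.drop (j + 2) = t := by
    have h2 : List.drop 2 (List.drop j cs) = List.drop (j + 2) cs := List.drop_drop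
    rw [← ht] at h2
    simpa using h2.symm
  rw [← ht, hd2]
  simp [pvAGo]

lemma pvAGo_close {cs : List Char} {j count : Nat} (h : ['}','}'] <+: cs.drop j) :
    pvAGo (cs.drop j) count = if count = 0 then 0 else 2 + pvAGo (cs.drop (j + 2)) (count - 1) := by
  obtain ⟨t, ht⟩ := h
  have hd2 : cs.drop (j + 2) = t := by
    have h2 : List.drop 2 (List.drop j cs) = List.drop (j + 2) cs := List.drop_drop
    rw [← ht] at h2
    simpa using h2.symm
  rw [← ht, hd2]
  simp [pvAGo]

-- if no brace pair occurs at any position in [i, m), A walks from i to m one char at a time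
lemma pvAGo_walk {cs : List Char} {i m : Nat} (count : Nat) (him : i ≤ m) (hm : m ≤ cs.length)
    (hno : ∀ j, i ≤ j → j < m → ¬ ['{','{'] <+: cs.drop j ∧ ¬ ['}','}'] <+: cs.drop j) :
    pvAGo (cs.drop i) count = (m - i) + pvAGo (cs.drop m) count := by
  induction m with
  | zero => simp_all
  | succ m ih =>
    rcases Nat.lt_or_ge i (m+1) with hlt | hge
    · have him' : i ≤ m := by omega
      have hm' : m < cs.length := by omega
      have h1 := ih him' (by omega) (fun j h1 h2 => hno j h1 (by omega))
      have h2 := pvAGo_skip (count := count) hm' (hno m him' (by omega)).1 (hno m him' (by omega)).2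
      rw [h1, h2]
      omega
    · have : i = m + 1 := by omega
      simp [this]

-- if no brace pair occurs anywhere at or after i, A consumes everything
lemma pvAGo_all {cs : List Char} {i : Nat} (count : Nat) (hi : i ≤ cs.length)
    (hno : ∀ j, i ≤ j → ¬ ['{','{'] <+: cs.drop j ∧ ¬ ['}','}'] <+: cs.drop j) :
    pvAGo (cs.drop i) count = cs.length - i := by
  have hw := pvAGo_walk count hi le_rfl (fun j h1 h2 => hno j h1)
  rw [hw]
  simp [List.drop_length, pvAGo]

-- the main simulation: B's find-jumping loop computes A's final index
lemma pvBGo_eq (cs : List Char) : ∀ (fuel i count : Nat), i ≤ cs.length → cs.length - i < fuel →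
    (pvBGo cs fuel count i).getD cs.length = i + pvAGo (cs.drop i) count := by
  intro fuel
  induction fuel with
  | zero => intro i count hi hf; omega
  | succ fuel ih =>
    intro i count hi hf
    simp only [pvBGo]
    set o := PySem.Chars.findFrom cs ['{', '{'] (i : Int) with ho_def
    set c := PySem.Chars.findFrom cs ['}', '}'] (i : Int) with hc_def
    by_cases h1 : o ≠ -1 ∧ (c = -1 ∨ o < c)
    · -- the next token is '{{' at position o
      rw [if_pos h1]
      obtain ⟨hoi, hopre, homin⟩ := PySem.Chars.findFrom_natCast_spec cs ['{','{'] i hi h1.1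
      set m := o.toNat with hm_def
      have him : i ≤ m := by omega
      have hmlen : m + 2 ≤ cs.length := by have := pv_match_len hopre; simp at this; omega
      have hnoC : ∀ j, i ≤ j → j < m → ¬ ['}','}'] <+: cs.drop j := by
        intro j hj1 hj2 hpre
        rcases h1.2 with hcn | hlt
        · exact ((PySem.Chars.findFrom_natCast_eq_neg_one_iff cs ['}','}'] i hi).mp hcn)
            (pv_prefix_drop_infix hj1 hpre)
        · have hcne : c ≠ -1 := by omega
          obtain ⟨hci, hcpre, hcmin⟩ := PySem.Chars.findFrom_natCast_spec cs ['}','}'] i hi hcne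
          exact hcmin j hj1 (by omega) hpre
      have hwalk := pvAGo_walk (cs := cs) (i := i) (m := m) count him (by omega)
        (fun j hj1 hj2 => ⟨homin j hj1 hj2, hnoC j hj1 hj2⟩)
      rw [hwalk, pvAGo_open hopre]
      have hrec := ih (m + 2) (count + 1) (by omega) (by omega)
      rw [hrec]
      omega
    · rw [if_neg h1]
      by_cases h2 : c ≠ -1
      · -- the next token is '}}' at position c
        rw [if_pos h2]
        obtain ⟨hci, hcpre, hcmin⟩ := PySem.Chars.findFrom_natCast_spec cs ['}','}'] i hi h2
        set m := c.toNat with hm_def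
        have him : i ≤ m := by omega
        have hmlen : m + 2 ≤ cs.length := by have := pv_match_len hcpre; simp at this; omega
        have hnoO : ∀ j, i ≤ j → j < m → ¬ ['{','{'] <+: cs.drop j := by
          intro j hj1 hj2 hpre
          by_cases ho1 : o = -1
          · exact ((PySem.Chars.findFrom_natCast_eq_neg_one_iff cs ['{','{'] i hi).mp ho1)
              (pv_prefix_drop_infix hj1 hpre)
          · obtain ⟨hoi, hopre, homin⟩ := PySem.Chars.findFrom_natCast_spec cs ['{','{'] i hi ho1
            have hco : c ≤ o := by
              rcases not_and_or.mp h1 with h | h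
              · exact absurd ho1 h
              · rw [not_or] at h
                omega
            exact homin j hj1 (by omega) hpre
        have hwalk := pvAGo_walk (cs := cs) (i := i) (m := m) count him (by omega)
          (fun j hj1 hj2 => ⟨hnoO j hj1 hj2, hcmin j hj1 hj2⟩)
        rw [hwalk, pvAGo_close hcpre]
        by_cases hcount : count = 0
        · rw [if_pos hcount, if_pos hcount, Option.getD_some]
          omega
        · simp only [if_neg hcount]
          have hrec := ih (m + 2) (count - 1) (by omega) (by omega)
          rw [hrec]
          omega
      · -- no brace pair at all from i on: both finds fail
        rw [if_neg h2]
        rw [not_not] at h2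
        have ho1 : o = -1 := by
          by_contra ho1
          exact h1 ⟨ho1, Or.inl h2⟩
        have hnone : ∀ j, i ≤ j → ¬ ['{','{'] <+: cs.drop j ∧ ¬ ['}','}'] <+: cs.drop j := by
          intro j hj
          constructor
          · intro hpre
            exact ((PySem.Chars.findFrom_natCast_eq_neg_one_iff cs ['{','{'] i hi).mp ho1)
              (pv_prefix_drop_infix hj hpre)
          · intro hpre
            exact ((PySem.Chars.findFrom_natCast_eq_neg_one_iff cs ['}','}'] i hi).mp h2)
              (pv_prefix_drop_infix hj hpre)
        rw [pvAGo_all count hi hnone, Option.getD_none]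
        omega

-- ===== VERDICT (by name: the statement is the Claim_ definition above) =====
theorem parse_balanced_vars_spec : Claim_equal_parse_balanced_vars := by
  intro s _
  unfold Spec_parse_balanced_vars parse_balanced_vars parse_balanced_vars_alt
  have h := pvBGo_eq s.toList (s.toList.length + 1) 0 0 (by omega) (by omega)
  cases hb : pvBGo s.toList (s.toList.length + 1) 0 0 with
  | some j =>
    rw [hb] at h
    simp at h
    rw [h]
  | none =>
    rw [hb] at h
    simp at h
    simp only [PySem.Str.slice] at *
    rw [← h, show s.length = s.toList.length by simp,
      show PySem.Chars.slice s.toList none (some ((s.toList.length : Nat) : Int))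
          = List.take s.toList.length s.toList from PySem.List.slice_to_natCast s.toList s.toList.length,
      List.take_length, String.ofList_toList]
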